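-- pv_equiv track=rewrite | github.com/agung96tm/learn-test | fetch_title_articles/articles.py | get_title_articles
-- ===== SOURCE A (Python) =====
-- def get_title_articles(article):
--     title_article = list(
--         set(
--             article["title"] or article["story_title"]
--             for article in article
--             if article["title"] or article["story_title"]
--         )
--     )
--     return sorted(title_article)
-- ===== SOURCE B (Python) =====
-- def _sorted_insert(out, v):
--     # insert v into the sorted duplicate-free list out, keeping it sorted and duplicate-free
--     for i, x in enumerate(out):
--         if x == v:
--             return out
--         if x > v:
--             return out[:i] + [v] + out[i:]
--     return out + [v]
--
--
-- def get_title_articles(article):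
--     out = []
--     for a in article:
--         v = a["title"] or a["story_title"]
--         if v:
--             out = _sorted_insert(out, v)
--     return out
-- ===== Notes on version B (the rewrite author's own statement) =====
-- stated objective: alternative
-- what changed: replaces hash-set deduplication followed by a final sort with an incremental insertion into a sorted duplicate-free accumulator (insertion-sort style, no sort call and no set)
import Mathlib
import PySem

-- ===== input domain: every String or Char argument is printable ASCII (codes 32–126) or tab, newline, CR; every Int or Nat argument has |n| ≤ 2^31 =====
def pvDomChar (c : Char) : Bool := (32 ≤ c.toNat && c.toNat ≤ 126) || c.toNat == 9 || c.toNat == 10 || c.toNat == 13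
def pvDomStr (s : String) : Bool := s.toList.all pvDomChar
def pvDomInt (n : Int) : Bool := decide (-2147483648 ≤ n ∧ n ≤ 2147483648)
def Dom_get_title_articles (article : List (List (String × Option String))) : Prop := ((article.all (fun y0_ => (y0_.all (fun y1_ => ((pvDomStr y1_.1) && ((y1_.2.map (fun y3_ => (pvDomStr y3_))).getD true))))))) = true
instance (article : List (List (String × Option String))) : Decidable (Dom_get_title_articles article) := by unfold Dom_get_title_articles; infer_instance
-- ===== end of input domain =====

-- B replaces A's hash-set deduplication + final sort by incremental insertion into a sorted
-- duplicate-free accumulator (insertion-sort style; no set, no sort call).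

-- ===== PORT A =====
-- Python truthiness of an Optional[str] value (None and "" are falsy).
def pyTruthy (o : Option String) : Bool :=
  match o with
  | some s => !s.toList.isEmpty
  | none => false

-- article["title"] or article["story_title"]  (keys looked up first-match; total via getD none, Pre_ guarantees presence)
def pySelectA (d : List (String × Option String)) : Option String :=
  let t := (d.lookup "title").getD none
  if pyTruthy t then t else (d.lookup "story_title").getD none

def get_title_articles (article : List (List (String × Option String))) : List String :=
  let title_article : List String :=
    PySem.Set.ofList
      (article.foldl (fun acc d =>
        let v := pySelectA d
        if pyTruthy v then acc ++ [v.getD ""] else acc) [])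
  PySem.List.sorted title_article (fun x => x) false

-- ===== PORT B =====
-- _sorted_insert(out, v): insert v into the sorted duplicate-free list out (Source B's scan,
-- expressed as the obvious structural recursion on out)
def sortedInsert (v : String) : List String → List String
  | [] => [v]
  | x :: rest =>
      if x = v then x :: rest
      else if v < x then v :: x :: rest
      else x :: sortedInsert v rest

-- a["title"] or a["story_title"] in Source B's loop
def selectB (a : List (String × Option String)) : Option String :=
  match (a.lookup "title").getD none with
  | none => (a.lookup "story_title").getD none
  | some s => if s = "" then (a.lookup "story_title").getD none else some s

def get_title_articles_alt (article : List (List (String × Option String))) : List String :=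
  article.foldl (fun out a =>
    match selectB a with
    | none => out
    | some s => if s = "" then out else sortedInsert s out) []

-- ===== PRECONDITION & SPEC =====
-- Pre_ excludes exactly the inputs where A raises KeyError: some dict lacks "title", or its
-- "title" value is falsy and it lacks "story_title".
def Pre_get_title_articles (article : List (List (String × Option String))) : Prop :=
  (article.all (fun d =>
    (d.lookup "title").isSome &&
      (pyTruthy ((d.lookup "title").getD none) || (d.lookup "story_title").isSome))) = true
instance (article : List (List (String × Option String))) : Decidable (Pre_get_title_articles article) := by unfold Pre_get_title_articles; infer_instance

def pvWitness_get_title_articles : (List (List (String × Option String))) :=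
  ([[("title", some "b"), ("story_title", none)], [("title", none), ("story_title", some "a")]])

def Spec_get_title_articles (article : List (List (String × Option String))) (out : List String) : Prop := out = get_title_articles_alt article
instance (article : List (List (String × Option String))) (out : List String) : Decidable (Spec_get_title_articles article out) := by unfold Spec_get_title_articles; infer_instance

-- ===== CLAIM (what is proved, stated in full; the proofs are below) =====
def Claim_equal_get_title_articles : Prop := ∀ (article : List (List (String × Option String))), Dom_get_title_articles article → Pre_get_title_articles article → Spec_get_title_articles article (get_title_articles article)

-- ===== LEMMAS AND PROOFS =====

-- the list of selected (truthy) titles, in article order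
def selList : List (List (String × Option String)) → List String
  | [] => []
  | d :: t =>
      let v := pySelectA d
      if pyTruthy v then v.getD "" :: selList t else selList t

theorem foldlA_eq (l : List (List (String × Option String))) : ∀ acc : List String,
    l.foldl (fun acc d =>
      let v := pySelectA d
      if pyTruthy v then acc ++ [v.getD ""] else acc) acc = acc ++ selList l := by
  induction l with
  | nil => intro acc; simp [selList]
  | cons d t ih =>
    intro acc
    simp only [List.foldl_cons, selList]
    split_ifs with h <;> simp [ih]

theorem selectB_eq (a : List (String × Option String)) : selectB a = pySelectA a := by
  unfold selectB pySelectA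
  cases h : (a.lookup "title").getD none with
  | none => simp [pyTruthy]
  | some s =>
    by_cases hs : s = ""
    · subst hs; simp [pyTruthy]
    · have : s.toList ≠ [] := fun h => hs (String.toList_eq_nil_iff.1 h)
      simp [pyTruthy, this, hs]

theorem stepB_eq (out : List String) (a : List (String × Option String)) :
    (match selectB a with
     | none => out
     | some s => if s = "" then out else sortedInsert s out)
      = (if pyTruthy (pySelectA a) then sortedInsert ((pySelectA a).getD "") out else out) := by
  rw [selectB_eq]
  cases h : pySelectA a with
  | none => simp [pyTruthy]
  | some s =>
    by_cases hs : s = ""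
    · subst hs; simp [pyTruthy]
    · have : s.toList ≠ [] := fun h => hs (String.toList_eq_nil_iff.1 h)
      simp [pyTruthy, this, hs]

theorem foldlB_eq (l : List (List (String × Option String))) : ∀ out : List String,
    l.foldl (fun out a =>
      match selectB a with
      | none => out
      | some s => if s = "" then out else sortedInsert s out) out
      = (selList l).foldl (fun o v => sortedInsert v o) out := by
  induction l with
  | nil => intro out; simp [selList]
  | cons d t ih =>
    intro out
    rw [List.foldl_cons, stepB_eq]
    simp only [selList]
    split_ifs with h
    · rw [List.foldl_cons]; exact ih _
    · exact ih _

theorem mem_sortedInsert (v x : String) : ∀ out : List String,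
    x ∈ sortedInsert v out ↔ x = v ∨ x ∈ out := by
  intro out
  induction out with
  | nil => simp [sortedInsert]
  | cons y t ih =>
    simp only [sortedInsert]
    split_ifs with h1 h2
    · subst h1
      constructor
      · exact fun hx => Or.inr hx
      · rintro (rfl | hx)
        · exact List.mem_cons_self
        · exact hx
    · simp only [List.mem_cons]
    · simp only [List.mem_cons, ih, or_left_comm]


theorem pairwise_sortedInsert (v : String) : ∀ out : List String,
    out.Pairwise (· < ·) → (sortedInsert v out).Pairwise (· < ·) := by
  intro out
  induction out with
  | nil => simp [sortedInsert]
  | cons y t ih =>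
    intro hp
    rcases List.pairwise_cons.1 hp with ⟨hy, ht⟩
    simp only [sortedInsert]
    split_ifs with h1 h2
    · exact hp
    · refine List.pairwise_cons.2 ⟨?_, hp⟩
      intro z hz
      rcases List.mem_cons.1 hz with rfl | hz
      · exact h2
      · exact lt_trans h2 (hy z hz)
    · refine List.pairwise_cons.2 ⟨?_, ih ht⟩
      intro z hz
      rcases (mem_sortedInsert v z t).1 hz with rfl | hz
      · exact lt_of_le_of_ne (not_lt.1 h2) h1
      · exact hy z hz

theorem insAll_props (L : List String) : ∀ out : List String, out.Pairwise (· < ·) →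
    (L.foldl (fun o v => sortedInsert v o) out).Pairwise (· < ·) ∧
    ∀ x, x ∈ L.foldl (fun o v => sortedInsert v o) out ↔ x ∈ out ∨ x ∈ L := by
  induction L with
  | nil =>
    intro out h
    exact ⟨by simp only [List.foldl_nil]; exact h, fun x => by simp⟩
  | cons v t ih =>
    intro out h
    simp only [List.foldl_cons]
    rcases ih (sortedInsert v out) (pairwise_sortedInsert v out h) with ⟨hp, hm⟩
    refine ⟨hp, fun x => ?_⟩
    rw [hm x, mem_sortedInsert]
    simp; tauto

theorem sorted_set_eq_insAll (L : List String) :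
    PySem.List.sorted (PySem.Set.ofList L) (fun x => x) false
      = L.foldl (fun o v => sortedInsert v o) [] := by
  rcases insAll_props L [] (by simp) with ⟨hp, hm⟩
  apply PySem.List.sorted_eq_of_perm_of_pairwise_lt
  · rw [List.perm_ext_iff_of_nodup (hp.imp ne_of_lt) (PySem.Set.nodup_ofList L)]
    intro x
    rw [hm x, PySem.Set.mem_ofList]
    simp
  · exact hp

-- ===== VERDICT (by name: the statement is the Claim_ definition above) =====
theorem get_title_articles_spec : Claim_equal_get_title_articles := by
  intro article _ _
  unfold Spec_get_title_articles get_title_articles get_title_articles_alt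
  rw [foldlA_eq, foldlB_eq, List.nil_append]
  exact sorted_set_eq_insAll _
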